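-- pv_equiv track=rewrite | github.com/Fondamenti18/fondamenti-di-programmazione | students/1620671/homework03/program02.py | guarda
-- ===== SOURCE A (Python) =====
-- def inside(img, x, y):
--     return 0 <= y < righe(img) and 0 <= x < colonne(img)
--
-- def righe(img) : return len(img)
--
-- def colonne(img) : return len(img[0])
--
-- def guarda(img, y0, x0, mod , count):
--     ver = [(0,255,0),(255,0,0)]
--     vialibera = False
--     if mod == '0' and count <= 5:
--         if x0 == 560:
--             count += 1
--             mod = '1'
--             return guarda(img, y0, x0, mod, count)
--         if img[y0][x0+40] in ver or not inside(img, x0+40, y0):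
--             count += 1
--             mod = '1'
--             return guarda(img, y0, x0, mod, count)
--         else:
--             vialibera = True
--     elif mod == '1' and count <= 5:
--         if y0 == 560:
--             count += 1
--             mod = '2'
--             return guarda(img, y0, x0, mod, count)
--         if img[y0+40][x0] in ver or not inside(img, x0, y0+40):
--             count += 1
--             mod = '2'
--             return guarda(img, y0, x0, mod, count)
--         else:
--             vialibera = True
--     elif mod == '2' and count <= 5:
--         if x0 == 0:
--             count += 1
--             mod = '3'
--             return guarda(img, y0, x0, mod, count)
--         if img[y0][x0-40] in ver or not inside(img, x0-40, y0):
--             count += 1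
--             mod = '3'
--             return guarda(img, y0, x0, mod, count)
--         else:
--             vialibera = True
--     elif mod == '3' and count <= 5:
--         if y0 == 0:
--             count += 1
--             mod = '0'
--             return guarda(img, y0, x0, mod, count)
--         if img[y0-40][x0] in ver or not inside(img, x0, y0-40):
--             count += 1
--             mod = '0'
--             return guarda(img, y0, x0, mod, count)
--         else:
--             vialibera = True
--     elif count > 5:
--         vialibera = False
--     return vialibera, mod
-- ===== SOURCE B (Python) =====
-- def righe(img): return len(img)
--
-- def colonne(img): return len(img[0])
--
-- def inside(img, x, y):
--     return 0 <= y < righe(img) and 0 <= x < colonne(img)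
--
-- def guarda(img, y0, x0, mod, count):
--     ver = [(0, 255, 0), (255, 0, 0)]
--     # one table row per direction: (dy, dx, border value of the tested coordinate, next mod)
--     step = {'0': (0, 40, 560, '1'),
--             '1': (40, 0, 560, '2'),
--             '2': (0, -40, 0, '3'),
--             '3': (-40, 0, 0, '0')}
--     while mod in step and count <= 5:
--         dy, dx, border, nxt = step[mod]
--         coord = x0 if dx else y0
--         if coord == border or img[y0 + dy][x0 + dx] in ver or not inside(img, x0 + dx, y0 + dy):
--             mod = nxt
--             count += 1
--         else:
--             return True, mod
--     return False, mod
-- ===== Notes on version B (the rewrite author's own statement) =====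
-- stated objective: simpler
-- what changed: A's four copy-pasted recursive branches (one per direction, each repeating the border test, pixel test and advance) are replaced by a single table-driven while loop over the mutable state (mod, count), with the per-direction data (dy, dx, border, next mod) looked up in one dict.
import Mathlib
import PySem

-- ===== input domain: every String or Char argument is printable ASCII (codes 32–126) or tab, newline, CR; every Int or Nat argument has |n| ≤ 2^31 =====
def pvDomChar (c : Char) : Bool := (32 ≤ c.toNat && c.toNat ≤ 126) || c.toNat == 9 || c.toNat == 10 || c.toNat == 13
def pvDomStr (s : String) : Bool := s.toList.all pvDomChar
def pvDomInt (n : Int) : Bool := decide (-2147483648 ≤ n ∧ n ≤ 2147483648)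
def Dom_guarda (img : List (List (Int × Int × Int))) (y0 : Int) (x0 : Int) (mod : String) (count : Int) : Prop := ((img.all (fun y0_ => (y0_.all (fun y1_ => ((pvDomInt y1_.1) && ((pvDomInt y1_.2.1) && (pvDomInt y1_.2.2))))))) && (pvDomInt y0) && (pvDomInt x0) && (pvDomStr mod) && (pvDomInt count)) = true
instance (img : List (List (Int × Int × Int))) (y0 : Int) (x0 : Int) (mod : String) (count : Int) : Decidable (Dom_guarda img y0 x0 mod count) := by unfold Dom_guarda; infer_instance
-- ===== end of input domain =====

-- B replaces A's four copy-pasted recursive branches by one table-driven while loop over (mod, count); objective: simpler.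

-- ===== PORT A =====
-- shared module helpers (identical in Source A and Source B): righe / colonne / inside / ver
def pvRighe (img : List (List (Int × Int × Int))) : Int := img.length

-- colonne raises IndexError on img = []; in A/B it is only reached after a successful img[·][·] access, so img ≠ [] there
def pvColonne (img : List (List (Int × Int × Int))) : Int := (PySem.List.pyGetD img 0 []).length

def pvInside (img : List (List (Int × Int × Int))) (x y : Int) : Bool :=
  decide (0 ≤ y ∧ y < pvRighe img) && decide (0 ≤ x ∧ x < pvColonne img)

def pvVer : List (Int × Int × Int) := [(0, 255, 0), (255, 0, 0)]

-- img[y][x]; the default branch corresponds to Python's IndexError — excluded by Pre_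
def pvPix (img : List (List (Int × Int × Int))) (y x : Int) : Int × Int × Int :=
  PySem.List.pyGetD (PySem.List.pyGetD img y []) x (1, 1, 1)

def guarda (img : List (List (Int × Int × Int))) (y0 : Int) (x0 : Int) (mod : String) (count : Int) : Bool × String :=
  if h0 : mod = "0" ∧ count ≤ 5 then
    if x0 = 560 then guarda img y0 x0 "1" (count + 1)
    else if pvPix img y0 (x0 + 40) ∈ pvVer || !(pvInside img (x0 + 40) y0) then
      guarda img y0 x0 "1" (count + 1)
    else (true, mod)
  else if h1 : mod = "1" ∧ count ≤ 5 then
    if y0 = 560 then guarda img y0 x0 "2" (count + 1)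
    else if pvPix img (y0 + 40) x0 ∈ pvVer || !(pvInside img x0 (y0 + 40)) then
      guarda img y0 x0 "2" (count + 1)
    else (true, mod)
  else if h2 : mod = "2" ∧ count ≤ 5 then
    if x0 = 0 then guarda img y0 x0 "3" (count + 1)
    else if pvPix img y0 (x0 - 40) ∈ pvVer || !(pvInside img (x0 - 40) y0) then
      guarda img y0 x0 "3" (count + 1)
    else (true, mod)
  else if h3 : mod = "3" ∧ count ≤ 5 then
    if y0 = 0 then guarda img y0 x0 "0" (count + 1)
    else if pvPix img (y0 - 40) x0 ∈ pvVer || !(pvInside img x0 (y0 - 40)) then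
      guarda img y0 x0 "0" (count + 1)
    else (true, mod)
  else if count > 5 then (false, mod)
  else (false, mod)
termination_by (6 - count).toNat
decreasing_by all_goals omega

-- ===== PORT B =====
-- the direction table: mod ↦ (dy, dx, border value of the tested coordinate, next mod)
def pvStep : PySem.Dict String (Int × Int × Int × String) :=
  PySem.Dict.ofList [("0", (0, 40, 560, "1")), ("1", (40, 0, 560, "2")),
                     ("2", (0, -40, 0, "3")), ("3", (-40, 0, 0, "0"))]

def guarda_alt (img : List (List (Int × Int × Int))) (y0 : Int) (x0 : Int) (mod : String) (count : Int) : Bool × String :=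
  match pvStep.get? mod with
  | some (dy, dx, border, nxt) =>
    if h : count ≤ 5 then
      let coord := if dx ≠ 0 then x0 else y0
      if coord = border || pvPix img (y0 + dy) (x0 + dx) ∈ pvVer || !(pvInside img (x0 + dx) (y0 + dy)) then
        guarda_alt img y0 x0 nxt (count + 1)
      else (true, mod)
    else (false, mod)
  | none => (false, mod)
termination_by (6 - count).toNat
decreasing_by all_goals omega

-- ===== PRECONDITION & SPEC =====
-- Helper data for Pre_: direction d ∈ {0,1,2,3} probes cell pvTarget, is skipped at pvBorderB,
-- indexes safely iff pvSafeB, and is blocked (search advances to the next direction) iff pvBlkB.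
def pvTarget (y0 x0 : Int) (d : Nat) : Int × Int :=
  if d = 0 then (y0, x0 + 40) else if d = 1 then (y0 + 40, x0)
  else if d = 2 then (y0, x0 - 40) else (y0 - 40, x0)

def pvBorderB (y0 x0 : Int) (d : Nat) : Bool :=
  if d = 0 then x0 == 560 else if d = 1 then y0 == 560 else if d = 2 then x0 == 0 else y0 == 0

def pvSafeB (img : List (List (Int × Int × Int))) (y0 x0 : Int) (d : Nat) : Bool :=
  pvBorderB y0 x0 d ||
    (decide (PySem.Raise.InRange img.length (pvTarget y0 x0 d).1) &&
     decide (PySem.Raise.InRange (PySem.List.pyGetD img (pvTarget y0 x0 d).1 []).length (pvTarget y0 x0 d).2))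

def pvBlkB (img : List (List (Int × Int × Int))) (y0 x0 : Int) (d : Nat) : Bool :=
  pvBorderB y0 x0 d ||
    (decide (pvPix img (pvTarget y0 x0 d).1 (pvTarget y0 x0 d).2 ∈ pvVer) ||
     !pvInside img (pvTarget y0 x0 d).2 (pvTarget y0 x0 d).1)

def pvModIdx (mod : String) : Option Nat :=
  if mod = "0" then some 0 else if mod = "1" then some 1
  else if mod = "2" then some 2 else if mod = "3" then some 3 else none

-- Pre_ excludes exactly the inputs on which Python A raises: an IndexError when, walking the direction
-- cycle from mod, the first not-blocked direction probes an out-of-range cell; and (with a conservative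
-- margin, count < -700 instead of the exact recursion limit) a RecursionError when every direction is
-- blocked and count is so negative that the recursion depth 6-count exceeds Python's stack limit.
def Pre_guarda (img : List (List (Int × Int × Int))) (y0 : Int) (x0 : Int) (mod : String) (count : Int) : Prop :=
  (match pvModIdx mod with
   | none => true
   | some m =>
     decide (count > 5) ||
     ((List.range (min 4 (6 - count).toNat)).any (fun k =>
        ((List.range k).all fun j => pvSafeB img y0 x0 ((m + j) % 4) && pvBlkB img y0 x0 ((m + j) % 4)) &&
        (pvSafeB img y0 x0 ((m + k) % 4) && !pvBlkB img y0 x0 ((m + k) % 4))) ||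
      (((List.range (min 4 (6 - count).toNat)).all fun k =>
          pvSafeB img y0 x0 ((m + k) % 4) && pvBlkB img y0 x0 ((m + k) % 4)) &&
       decide (-700 ≤ count)))) = true
instance (img : List (List (Int × Int × Int))) (y0 : Int) (x0 : Int) (mod : String) (count : Int) : Decidable (Pre_guarda img y0 x0 mod count) := by unfold Pre_guarda; infer_instance

def pvWitness_guarda : (List (List (Int × Int × Int))) × Int × Int × String × Int :=
  ([[(0, 255, 0)]], 0, 0, "0", 6)

def Spec_guarda (img : List (List (Int × Int × Int))) (y0 : Int) (x0 : Int) (mod : String) (count : Int) (out : Bool × String) : Prop := out = guarda_alt img y0 x0 mod count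
instance (img : List (List (Int × Int × Int))) (y0 : Int) (x0 : Int) (mod : String) (count : Int) (out : Bool × String) : Decidable (Spec_guarda img y0 x0 mod count out) := by unfold Spec_guarda; infer_instance

-- ===== CLAIM (what is proved, stated in full; the proofs are below) =====
def Claim_equal_guarda : Prop := ∀ (img : List (List (Int × Int × Int))) (y0 : Int) (x0 : Int) (mod : String) (count : Int), Dom_guarda img y0 x0 mod count → Pre_guarda img y0 x0 mod count → Spec_guarda img y0 x0 mod count (guarda img y0 x0 mod count)

-- ===== LEMMAS AND PROOFS =====

theorem pvStep_get?_none (mod : String) (h0 : mod ≠ "0") (h1 : mod ≠ "1") (h2 : mod ≠ "2") (h3 : mod ≠ "3") :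
    pvStep.get? mod = none := by
  have e0 : ("0" == mod) = false := by simpa using (Ne.symm h0)
  have e1 : ("1" == mod) = false := by simpa using (Ne.symm h1)
  have e2 : ("2" == mod) = false := by simpa using (Ne.symm h2)
  have e3 : ("3" == mod) = false := by simpa using (Ne.symm h3)
  rw [pvStep, show PySem.Dict.ofList [("0", ((0:Int), (40:Int), (560:Int), "1")), ("1", (40, 0, 560, "2")), ("2", (0, -40, 0, "3")), ("3", (-40, 0, 0, "0"))] = PySem.Dict.mk [("0", ((0:Int), (40:Int), (560:Int), "1")), ("1", (40, 0, 560, "2")), ("2", (0, -40, 0, "3")), ("3", (-40, 0, 0, "0"))] from by decide]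
  simp [PySem.Dict.get?_mk_cons, PySem.Dict.get?, e0, e1, e2, e3]

-- the two ports agree on every input (the total forms coincide everywhere; Pre_ is what ties them to Python A)
theorem guarda_eq_alt (n : Nat) :
    ∀ (img : List (List (Int × Int × Int))) (y0 x0 : Int) (mod : String) (count : Int),
      (6 - count).toNat = n → guarda img y0 x0 mod count = guarda_alt img y0 x0 mod count := by
  induction n with
  | zero =>
    intro img y0 x0 mod count hn
    have hc : ¬ count ≤ 5 := by omega
    rw [guarda, guarda_alt]
    simp only [hc, and_false, dite_false]
    cases h : pvStep.get? mod with
    | none => simp [hc]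
    | some v =>
      obtain ⟨dy, dx, border, nxt⟩ := v
      simp [hc]
  | succ n ih =>
    intro img y0 x0 mod count hn
    by_cases hc : count ≤ 5
    · have hrec : (6 - (count + 1)).toNat = n := by omega
      by_cases hm0 : mod = "0"
      · subst hm0
        rw [guarda, guarda_alt]
        simp only [hc, and_true, dite_true, pvStep]
        simp only [show (PySem.Dict.ofList [("0", ((0:Int), (40:Int), (560:Int), "1")), ("1", (40, 0, 560, "2")), ("2", (0, -40, 0, "3")), ("3", (-40, 0, 0, "0"))]).get? "0" = some ((0 : Int), (40 : Int), (560 : Int), "1") from by decide]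
        simp only [if_pos (by decide : ((40 : Int)) ≠ 0), add_zero]
        by_cases hb : x0 = 560
        · subst hb; simp [ih img y0 560 "1" (count + 1) hrec]
        · simp only [hb, decide_false, Bool.false_or]
          by_cases hcnd : (decide (pvPix img y0 (x0 + 40) ∈ pvVer) || !pvInside img (x0 + 40) y0) = true
          · rw [if_pos hcnd, if_pos hcnd]
            exact ih img y0 x0 "1" (count + 1) hrec
          · rw [if_neg hcnd, if_neg hcnd]
            simp
      by_cases hm1 : mod = "1"
      · subst hm1
        rw [guarda, guarda_alt]
        simp only [hm0, false_and, dite_false]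
        simp only [hc, and_true, dite_true, pvStep]
        simp only [show (PySem.Dict.ofList [("0", ((0:Int), (40:Int), (560:Int), "1")), ("1", (40, 0, 560, "2")), ("2", (0, -40, 0, "3")), ("3", (-40, 0, 0, "0"))]).get? "1" = some ((40 : Int), (0 : Int), (560 : Int), "2") from by decide]
        simp only [if_neg (show ¬ ((0 : Int)) ≠ 0 from by decide), add_zero]
        by_cases hb : y0 = 560
        · subst hb; simp [ih img 560 x0 "2" (count + 1) hrec]
        · simp only [hb, decide_false, Bool.false_or]
          by_cases hcnd : (decide (pvPix img (y0 + 40) x0 ∈ pvVer) || !pvInside img x0 (y0 + 40)) = true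
          · rw [if_pos hcnd, if_pos hcnd]
            exact ih img y0 x0 "2" (count + 1) hrec
          · rw [if_neg hcnd, if_neg hcnd]
            simp
      by_cases hm2 : mod = "2"
      · subst hm2
        rw [guarda, guarda_alt]
        simp only [hm0, hm1, false_and, dite_false]
        simp only [hc, and_true, dite_true, pvStep]
        simp only [show (PySem.Dict.ofList [("0", ((0:Int), (40:Int), (560:Int), "1")), ("1", (40, 0, 560, "2")), ("2", (0, -40, 0, "3")), ("3", (-40, 0, 0, "0"))]).get? "2" = some ((0 : Int), (-40 : Int), (0 : Int), "3") from by decide]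
        simp only [if_pos (by decide : ((-40 : Int)) ≠ 0), add_zero, show x0 + -40 = x0 - 40 from by ring]
        by_cases hb : x0 = 0
        · subst hb; simp [ih img y0 0 "3" (count + 1) hrec]
        · simp only [hb, decide_false, Bool.false_or]
          by_cases hcnd : (decide (pvPix img y0 (x0 - 40) ∈ pvVer) || !pvInside img (x0 - 40) y0) = true
          · rw [if_pos hcnd, if_pos hcnd]
            exact ih img y0 x0 "3" (count + 1) hrec
          · rw [if_neg hcnd, if_neg hcnd]
            simp
      by_cases hm3 : mod = "3"
      · subst hm3
        rw [guarda, guarda_alt]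
        simp only [hm0, hm1, hm2, false_and, dite_false]
        simp only [hc, and_true, dite_true, pvStep]
        simp only [show (PySem.Dict.ofList [("0", ((0:Int), (40:Int), (560:Int), "1")), ("1", (40, 0, 560, "2")), ("2", (0, -40, 0, "3")), ("3", (-40, 0, 0, "0"))]).get? "3" = some ((-40 : Int), (0 : Int), (0 : Int), "0") from by decide]
        simp only [if_neg (show ¬ ((0 : Int)) ≠ 0 from by decide), add_zero, show y0 + -40 = y0 - 40 from by ring]
        by_cases hb : y0 = 0
        · subst hb; simp [ih img 0 x0 "0" (count + 1) hrec]
        · simp only [hb, decide_false, Bool.false_or]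
          by_cases hcnd : (decide (pvPix img (y0 - 40) x0 ∈ pvVer) || !pvInside img x0 (y0 - 40)) = true
          · rw [if_pos hcnd, if_pos hcnd]
            exact ih img y0 x0 "0" (count + 1) hrec
          · rw [if_neg hcnd, if_neg hcnd]
            simp
      rw [guarda, guarda_alt, pvStep_get?_none mod hm0 hm1 hm2 hm3]
      simp only [hm0, hm1, hm2, hm3, false_and, dite_false]
      simp [show ¬ count > 5 from by omega]
    · rw [guarda, guarda_alt]
      simp only [hc, and_false, dite_false]
      cases h : pvStep.get? mod with
      | none => simp [hc]
      | some v =>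
        obtain ⟨dy, dx, border, nxt⟩ := v
        simp [hc]

-- ===== VERDICT (by name: the statement is the Claim_ definition above) =====
theorem guarda_spec : Claim_equal_guarda := by
  intro img y0 x0 mod count _ _
  unfold Spec_guarda
  exact guarda_eq_alt (6 - count).toNat img y0 x0 mod count rfl
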